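-- pv_equiv track=rewrite | github.com/TavoStatic/nova | services/nova_query_classifiers.py | is_capability_query
-- ===== SOURCE A (Python) =====
-- def is_capability_query(text: str) -> bool:
--     candidate = (text or "").strip().lower()
--     if not candidate:
--         return False
--     cues = [
--         "what can you do",
--         "what do you do",
--         "what do you do nova",
--         "what do you do?",
--         "your abilities",
--         "your ability",
--         "what do you help with",
--         "what do you do here",
--         "what are you capable",
--         "know what your capable",
--         "know what you're capable",
--         "capabilities",
--     ]
--     return any(cue in candidate for cue in cues)
-- ===== SOURCE B (Python) =====
-- # Streaming matcher: one left-to-right pass over the normalized text, carrying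
-- # the set of partially matched cues, instead of a separate substring test per cue.
-- _CUES = (
--     "what can you do|what do you do|what do you do nova|what do you do?|"
--     "your abilities|your ability|what do you help with|what do you do here|"
--     "what are you capable|know what your capable|know what you're capable|"
--     "capabilities"
-- ).split("|")
--
-- def is_capability_query(text: str) -> bool:
--     candidate = (text or "").strip().lower()
--     pending = []
--     for ch in candidate:
--         pending = [rest[1:] for rest in pending + _CUES if rest[:1] == ch]
--         if "" in pending:
--             return True
--     return False
-- ===== Notes on version B (the rewrite author's own statement) =====
-- stated objective: alternative
-- what changed: B replaces A's twelve independent whole-string substring tests by a single streaming left-to-right pass over the normalized text that carries the list of partially matched cue suffixes (an on-line NFA-style multi-pattern scan) and short-circuits on the first completed cue.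
import Mathlib
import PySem

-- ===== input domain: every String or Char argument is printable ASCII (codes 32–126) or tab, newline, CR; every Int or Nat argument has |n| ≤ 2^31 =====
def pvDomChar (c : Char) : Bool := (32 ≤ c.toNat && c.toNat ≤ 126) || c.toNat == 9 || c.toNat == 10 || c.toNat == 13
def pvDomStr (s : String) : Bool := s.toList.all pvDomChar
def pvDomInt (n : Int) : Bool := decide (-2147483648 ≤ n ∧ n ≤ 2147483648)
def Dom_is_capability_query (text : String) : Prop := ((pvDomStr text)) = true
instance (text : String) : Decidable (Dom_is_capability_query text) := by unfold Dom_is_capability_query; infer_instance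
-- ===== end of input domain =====

-- B replaces A's per-cue substring tests by one streaming left-to-right pass
-- that carries the set of partially matched cue suffixes (objective: alternative).

-- ===== PORT A =====
def pvCuesA : List (List Char) :=
  [ "what can you do".toList
  , "what do you do".toList
  , "what do you do nova".toList
  , "what do you do?".toList
  , "your abilities".toList
  , "your ability".toList
  , "what do you help with".toList
  , "what do you do here".toList
  , "what are you capable".toList
  , "know what your capable".toList
  , "know what you're capable".toList
  , "capabilities".toList ]

def is_capability_query (text : String) : Bool :=
  -- candidate = (text or "").strip().lower()  (text or "" = text for a str argument)
  let candidate := PySem.Chars.lower (PySem.Chars.strip text.toList)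
  if candidate.isEmpty then false
  else pvCuesA.any (fun cue => PySem.Chars.isIn cue candidate)

-- ===== PORT B =====
-- _CUES = "…|…".split("|")
def pvCuesB : List (List Char) :=
  PySem.Chars.splitOn
    ("what can you do|what do you do|what do you do nova|what do you do?|your abilities|your ability|what do you help with|what do you do here|what are you capable|know what your capable|know what you're capable|capabilities").toList
    "|".toList

-- the for-loop over candidate: pending = [rest[1:] for rest in pending + _CUES if rest[:1] == ch];
-- if "" in pending: return True; after the loop: return False
def pvScan (pending : List (List Char)) : List Char → Bool
  | [] => false
  | ch :: rest =>
    let pending' := ((pending ++ pvCuesB).filter (fun r => r.take 1 = [ch])).map (fun r => r.drop 1)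
    if [] ∈ pending' then true else pvScan pending' rest

def is_capability_query_alt (text : String) : Bool :=
  let candidate := PySem.Chars.lower (PySem.Chars.strip text.toList)
  pvScan [] candidate

-- ===== PRECONDITION & SPEC =====
def Spec_is_capability_query (text : String) (out : Bool) : Prop := out = is_capability_query_alt text
instance (text : String) (out : Bool) : Decidable (Spec_is_capability_query text out) := by unfold Spec_is_capability_query; infer_instance

-- ===== CLAIM =====
def Claim_equal_is_capability_query : Prop := ∀ (text : String), Dom_is_capability_query text → Spec_is_capability_query text (is_capability_query text)

-- ===== LEMMAS AND PROOFS =====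

set_option maxRecDepth 4000 in
lemma pvCuesB_eq : pvCuesB = pvCuesA := by decide

set_option maxRecDepth 4000 in
lemma pvCuesB_ne_nil : ∀ w ∈ pvCuesB, w ≠ [] := by decide

lemma pv_step_mem (pending : List (List Char)) (ch : Char) (r : List Char)
    (h : ch :: r ∈ pending ++ pvCuesB) :
    r ∈ ((pending ++ pvCuesB).filter (fun s => s.take 1 = [ch])).map (fun s => s.drop 1) :=
  List.mem_map.mpr ⟨ch :: r, List.mem_filter.mpr ⟨h, by simp⟩, rfl⟩

-- loop invariant: the scan succeeds iff some still-pending suffix completes as a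
-- prefix of the remaining text, or some cue occurs inside the remaining text
lemma pvScan_iff (cs : List Char) : ∀ (pending : List (List Char)),
    pvScan pending cs = true ↔
      (∃ r ∈ pending, r ≠ [] ∧ r <+: cs) ∨ (∃ w ∈ pvCuesB, w <:+: cs) := by
  induction cs with
  | nil =>
    intro pending
    simp only [pvScan]
    constructor
    · intro h; exact absurd h (by simp)
    · rintro (⟨r, _, hne, hp⟩ | ⟨w, hw, hinf⟩)
      · exact absurd (List.prefix_nil.mp hp) hne
      · exact absurd (List.infix_nil.mp hinf) (pvCuesB_ne_nil w hw)
  | cons ch rest ih =>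
    intro pending
    simp only [pvScan]
    split_ifs with hmem
    · -- [] ∈ pending' : some r = [ch] is in pending ++ cues, so r <+: ch :: rest
      simp only [List.mem_map, List.mem_filter] at hmem
      obtain ⟨r, ⟨hr, htake⟩, hdrop⟩ := hmem
      have hr_eq : r = [ch] := by
        cases r with
        | nil => simp at htake
        | cons a t =>
          simp only [List.take_succ_cons, List.take_zero] at htake
          simp only [List.drop_succ_cons, List.drop_zero] at hdrop
          simp_all
      subst hr_eq
      simp only [true_iff]
      rcases List.mem_append.mp hr with h | h
      · exact Or.inl ⟨[ch], h, by simp, by simp⟩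
      · exact Or.inr ⟨[ch], h, (List.prefix_append [ch] rest).isInfix⟩
    · rw [ih]
      constructor
      · rintro (⟨r', hr', hne', hp'⟩ | ⟨w, hw, hinf⟩)
        · -- r' = r.drop 1 for some r = ch :: r' in pending ++ cues
          simp only [List.mem_map, List.mem_filter] at hr'
          obtain ⟨r, ⟨hr, htake⟩, hdrop⟩ := hr'
          have hr_eq : r = ch :: r' := by
            cases r with
            | nil => simp at htake
            | cons a t =>
              simp only [List.take_succ_cons, List.take_zero] at htake
              simp only [List.drop_succ_cons, List.drop_zero] at hdrop
              simp_all
          subst hr_eq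
          rcases List.mem_append.mp hr with h | h
          · exact Or.inl ⟨ch :: r', h, by simp, by simpa using hp'⟩
          · exact Or.inr ⟨ch :: r', h, (List.cons_prefix_cons.mpr ⟨rfl, hp'⟩ : ch :: r' <+: ch :: rest).isInfix⟩
        · exact Or.inr ⟨w, hw, hinf.trans (List.suffix_cons ch rest).isInfix⟩
      · rintro (⟨r, hr, hne, hp⟩ | ⟨w, hw, hinf⟩)
        · -- r nonempty prefix of ch :: rest, from pending
          obtain ⟨x, t, rfl⟩ := List.exists_cons_of_ne_nil hne
          obtain ⟨rfl, ht⟩ := List.cons_prefix_cons.mp hp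
          have hm := pv_step_mem pending _ t (List.mem_append.mpr (Or.inl hr))
          cases t with
          | nil => exact absurd hm hmem
          | cons b u => exact Or.inl ⟨b :: u, hm, by simp, ht⟩
        · rcases List.infix_cons_iff.mp hinf with hp | hinf'
          · -- w is a prefix of ch :: rest, w comes from the cue list
            obtain ⟨x, t, rfl⟩ := List.exists_cons_of_ne_nil (pvCuesB_ne_nil w hw)
            obtain ⟨rfl, ht⟩ := List.cons_prefix_cons.mp hp
            have hm := pv_step_mem pending _ t (List.mem_append.mpr (Or.inr hw))
            cases t with
            | nil => exact absurd hm hmem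
            | cons b u => exact Or.inl ⟨b :: u, hm, by simp, ht⟩
          · exact Or.inr ⟨w, hw, hinf'⟩

-- ===== VERDICT =====
theorem is_capability_query_spec : Claim_equal_is_capability_query := by
  intro text _
  unfold Spec_is_capability_query is_capability_query is_capability_query_alt
  set cand := PySem.Chars.lower (PySem.Chars.strip text.toList) with hcand
  by_cases hnil : cand = []
  · simp [hnil, pvScan]
  · rw [if_neg (by simp [hnil])]
    rw [Bool.eq_iff_iff, pvScan_iff cand []]
    simp only [List.not_mem_nil, false_and, exists_false,
      List.any_eq_true, ← pvCuesB_eq]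
    constructor
    · rintro ⟨w, hw, hin⟩; exact Or.inr ⟨w, hw, (PySem.Chars.isIn_iff_infix w cand).mp hin⟩
    · rintro (h | ⟨w, hw, hinf⟩)
      · exact absurd h (by simp)
      · exact ⟨w, hw, (PySem.Chars.isIn_iff_infix w cand).mpr hinf⟩
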